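-- pv_equiv track=rewrite | github.com/zixuya/BadouNLP | 黄懿/week04/第四周作业.py | calc
-- ===== SOURCE A (Python) =====
-- def calc(sentence, Dict):
--     my_dict = {}
--     length = len(sentence)
--     for i in range(length):
--         my_list = []
--         j = i
--         slice = sentence[i]
--         while j < length:
--             if slice in Dict:
--                 my_list.append(j)
--             j += 1
--             slice = sentence[i: j + 1]
--         if not my_list:
--             my_list.append(i)
--         my_dict[i] = my_list
--     return my_dict
-- ===== SOURCE B (Python) =====
-- def calc(sentence, Dict):
--     # Word-centric: scan each distinct dictionary word over the sentence once,
--     # bucket its end positions by start index, then sort each bucket.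
--     n = len(sentence)
--     buckets = [[] for _ in range(n)]
--     seen = set()
--     for w in Dict:
--         if w in seen:
--             continue
--         seen.add(w)
--         m = len(w)
--         if m == 0:
--             continue
--         for s in range(n - m + 1):
--             if sentence[s:s + m] == w:
--                 buckets[s].append(s + m - 1)
--     return {i: (sorted(b) if b else [i]) for i, b in enumerate(buckets)}
-- ===== Notes on version B (the rewrite author's own statement) =====
-- stated objective: faster
-- what changed: Instead of testing every substring sentence[i:j+1] for every start i against the whole dict (building an O(n)-size slice and doing a dict lookup for each of the O(n^2) (i,j) pairs), B iterates once over the distinct dictionary words, scans the sentence for each word's occurrences, buckets end positions by start index, and sorts each (duplicate-free) bucket.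
import Mathlib
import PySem

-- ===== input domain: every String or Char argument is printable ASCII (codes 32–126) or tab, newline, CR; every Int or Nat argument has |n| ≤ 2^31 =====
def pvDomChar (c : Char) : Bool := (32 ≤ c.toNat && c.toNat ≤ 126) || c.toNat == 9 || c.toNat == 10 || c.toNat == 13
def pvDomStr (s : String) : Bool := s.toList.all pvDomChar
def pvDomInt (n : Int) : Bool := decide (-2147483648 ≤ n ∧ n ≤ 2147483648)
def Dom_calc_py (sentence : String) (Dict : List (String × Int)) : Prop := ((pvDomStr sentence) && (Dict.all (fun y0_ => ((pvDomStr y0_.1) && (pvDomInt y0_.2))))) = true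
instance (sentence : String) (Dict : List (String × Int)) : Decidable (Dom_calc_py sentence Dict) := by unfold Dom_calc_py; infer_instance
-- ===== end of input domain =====

-- B replaces A's per-start scan of all substrings against the whole Dict by one scan of the
-- sentence per distinct dictionary word, bucketing end positions by start index (objective: faster).


-- ===== PORT A =====
-- inner 'while j < length' loop; fuel = (length - j).toNat
def calcInnerA (Dict : List (String × Int)) (cs : List Char) (i : Int) :
    Nat → Int → List Char → List Int → List Int
  | 0, _, _, acc => acc
  | fuel + 1, j, slc, acc =>
      let acc' := if Dict.any (fun kv => kv.1.toList == slc) then acc ++ [j] else acc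
      calcInnerA Dict cs i fuel (j + 1) (PySem.List.slice cs (some i) (some (j + 1 + 1))) acc'

def calc_py (sentence : String) (Dict : List (String × Int)) : List (Int × List Int) :=
  let cs := sentence.toList
  let length : Int := cs.length
  let my_dict := (PySem.List.pyRange 0 length 1).foldl
    (fun (d : PySem.Dict Int (List Int)) i =>
      -- sentence[i]: i ∈ range(length) so pyGet? is always some (none branch unreachable)
      let slice0 : List Char := match PySem.List.pyGet? cs i with | some c => [c] | none => []
      let my_list := calcInnerA Dict cs i (length - i).toNat i slice0 []
      let my_list := if my_list = [] then [i] else my_list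
      d.insert i my_list) PySem.Dict.empty
  my_dict.items

-- ===== PORT B =====
-- occurrence scan of one word w (m = len(w)) over the sentence, appending ends into buckets
def calcScanB (cs : List Char) (w : List Char) (m : Nat) (buckets : List (List Int)) : List (List Int) :=
  (PySem.List.pyRange 0 ((cs.length : Int) - m + 1) 1).foldl
    (fun bs s =>
      if PySem.List.slice cs (some s) (some (s + m)) == w then
        bs.set s.toNat (bs.getD s.toNat [] ++ [s + (m : Int) - 1])
      else bs) buckets

def calc_py_alt (sentence : String) (Dict : List (String × Int)) : List (Int × List Int) :=
  let cs := sentence.toList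
  let n := cs.length
  let st := Dict.foldl
    (fun (st : List (List Int) × PySem.Set String) kv =>
      if PySem.Set.contains st.2 kv.1 then st
      else
        let seen := PySem.Set.add st.2 kv.1
        let m := kv.1.toList.length
        if m = 0 then (st.1, seen)
        else (calcScanB cs kv.1.toList m st.1, seen))
    (List.replicate n ([] : List Int), PySem.Set.empty)
  (PySem.List.enumerate st.1 0).map
    (fun p => (p.1, if p.2 = [] then [p.1] else PySem.List.sorted p.2 (fun x => x) false))

-- ===== PRECONDITION & SPEC =====
def Spec_calc_py (sentence : String) (Dict : List (String × Int)) (out : List (Int × List Int)) : Prop := out = calc_py_alt sentence Dict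
instance (sentence : String) (Dict : List (String × Int)) (out : List (Int × List Int)) : Decidable (Spec_calc_py sentence Dict out) := by unfold Spec_calc_py; infer_instance

-- ===== CLAIM (what is proved, stated in full; the proofs are below) =====
def Claim_equal_calc_py : Prop := ∀ (sentence : String) (Dict : List (String × Int)), Dom_calc_py sentence Dict → Spec_calc_py sentence Dict (calc_py sentence Dict)

-- ===== LEMMAS AND PROOFS =====

-- the end positions A collects for start i
def endsA (Dict : List (String × Int)) (cs : List Char) (i j : Int) : List Int :=
  (PySem.List.pyRange j (cs.length : Int) 1).filter
    (fun j' => Dict.any (fun kv => kv.1.toList == PySem.List.slice cs (some i) (some (j' + 1))))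

-- the word list B's 'seen' set lets through: first occurrences not already in seen
def freshList : List String → PySem.Set String → List String
  | [], _ => []
  | w :: ws, seen =>
      if PySem.Set.contains seen w then freshList ws seen
      else w :: freshList ws (PySem.Set.add seen w)

-- does word w (as chars) match the sentence at start i
def matchB (cs : List Char) (i : Int) (w : List Char) : Bool :=
  !(w.isEmpty) && (PySem.List.slice cs (some i) (some (i + w.length)) == w)

-- the per-word step of B's outer fold (after the 'seen' filter is factored out)
def stepB (cs : List Char) (bs : List (List Int)) (w : String) : List (List Int) :=
  if w.toList.length = 0 then bs else calcScanB cs w.toList w.toList.length bs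

-- A's per-start value, as calc_py computes it
def valA (Dict : List (String × Int)) (cs : List Char) (i : Int) : List Int :=
  let slice0 : List Char := match PySem.List.pyGet? cs i with | some c => [c] | none => []
  let my_list := calcInnerA Dict cs i (((cs.length : Int)) - i).toNat i slice0 []
  if my_list = [] then [i] else my_list

lemma matchB_nil (cs : List Char) (i : Int) : matchB cs i [] = false := by
  simp [matchB]

lemma matchB_of_ne_nil (cs : List Char) (i : Int) (w : List Char) (h : w ≠ []) :
    matchB cs i w = (PySem.List.slice cs (some i) (some (i + w.length)) == w) := by
  unfold matchB
  rw [show w.isEmpty = false from List.isEmpty_eq_false_iff.2 h]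
  simp

lemma matchB_iff (cs : List Char) (i : Int) (w : List Char) :
    matchB cs i w = true ↔
      w ≠ [] ∧ PySem.List.slice cs (some i) (some (i + w.length)) = w := by
  constructor
  · intro h
    by_cases hw : w = []
    · rw [hw, matchB_nil] at h; exact absurd h (by simp)
    · rw [matchB_of_ne_nil cs i w hw] at h
      exact ⟨hw, by simpa using h⟩
  · rintro ⟨hw, hsl⟩
    rw [matchB_of_ne_nil cs i w hw]
    simp [hsl]

lemma freshList_mem (ws : List String) (seen : PySem.Set String) (x : String) :
    x ∈ freshList ws seen ↔ x ∈ ws ∧ ¬ x ∈ seen := by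
  induction ws generalizing seen with
  | nil => simp [freshList]
  | cons w ws ih =>
    by_cases hc : w ∈ seen
    · have hct : PySem.Set.contains seen w = true := (PySem.Set.contains_iff seen w).2 hc
      simp only [freshList, hct, if_true, ih, List.mem_cons]
      constructor
      · rintro ⟨h1, h2⟩; exact ⟨Or.inr h1, h2⟩
      · rintro ⟨h1 | h1, h2⟩
        · exact absurd (h1 ▸ hc) h2
        · exact ⟨h1, h2⟩
    · have hct : PySem.Set.contains seen w = false := by
        rw [← Bool.not_eq_true]
        intro h
        exact hc ((PySem.Set.contains_iff seen w).1 h)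
      simp only [freshList, hct, Bool.false_eq_true, if_false, List.mem_cons, ih,
        PySem.Set.mem_add]
      constructor
      · rintro (rfl | ⟨h1, h2⟩)
        · exact ⟨Or.inl rfl, hc⟩
        · exact ⟨Or.inr h1, fun hx => h2 (Or.inl hx)⟩
      · rintro ⟨h1, h2⟩
        by_cases hxw : x = w
        · exact Or.inl hxw
        · rcases h1 with rfl | h1
          · exact Or.inl rfl
          · refine Or.inr ⟨h1, fun hx => ?_⟩
            rcases hx with h | h
            · exact h2 h
            · exact hxw h

lemma freshList_nodup (ws : List String) (seen : PySem.Set String) :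
    (freshList ws seen).Nodup := by
  induction ws generalizing seen with
  | nil => simp [freshList]
  | cons w ws ih =>
    by_cases hc : PySem.Set.contains seen w = true
    · simp only [freshList, hc, if_true]
      exact ih seen
    · simp only [freshList, hc]
      refine List.nodup_cons.2 ⟨fun hmem => ?_, ih _⟩
      have := (freshList_mem _ _ _).1 hmem
      exact this.2 ((PySem.Set.mem_add seen w w).2 (Or.inr rfl))

lemma innerA_eq (Dict : List (String × Int)) (cs : List Char) (i : Int) :
    ∀ (fuel : Nat) (j : Nat) (acc : List Int), j ≤ cs.length → fuel = cs.length - j →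
      calcInnerA Dict cs i fuel (j : Int)
        (PySem.List.slice cs (some i) (some ((j : Int) + 1))) acc
      = acc ++ endsA Dict cs i j := by
  intro fuel
  induction fuel with
  | zero =>
    intro j acc hj hf
    have hj' : j = cs.length := by omega
    subst hj'
    simp [calcInnerA, endsA,
      PySem.List.pyRange_one_eq_nil (le_refl ((cs.length : Nat) : Int))]
  | succ fuel ih =>
    intro j acc hj hf
    have hjlt : j < cs.length := by omega
    simp only [calcInnerA]
    have hcast : (j : Int) + 1 = ((j + 1 : Nat) : Int) := by push_cast; ring
    rw [hcast]
    rw [ih (j + 1) _ (by omega) (by omega)]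
    have hrange : PySem.List.pyRange (j : Int) (cs.length : Int) 1
        = (j : Int) :: PySem.List.pyRange ((j + 1 : Nat) : Int) (cs.length : Int) 1 := by
      rw [PySem.List.pyRange_one_cons (by exact_mod_cast hjlt), hcast]
    simp only [endsA, hrange, List.filter_cons, hcast]
    by_cases hP : (Dict.any fun kv =>
        kv.1.toList == PySem.List.slice cs (some i) (some ((j : Int) + 1))) = true
    · simp [hP, List.append_assoc]
    · simp [hP]

lemma calc_py_unfold (sentence : String) (Dict : List (String × Int)) :
    calc_py sentence Dict =
      ((PySem.List.pyRange 0 (sentence.toList.length : Int) 1).foldl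
        (fun d i => d.insert i (valA Dict sentence.toList i)) PySem.Dict.empty).items := rfl

lemma calc_py_eq (sentence : String) (Dict : List (String × Int)) :
    calc_py sentence Dict =
      (List.range sentence.toList.length).map
        (fun (k : Nat) => ((k : Int),
          if endsA Dict sentence.toList k k = [] then [(k : Int)]
          else endsA Dict sentence.toList k k)) := by
  set cs := sentence.toList with hcs
  rw [calc_py_unfold,
      PySem.Dict.items_foldl_insert_fresh _ (fun (i : Int) => i) (valA Dict cs)
        PySem.Dict.empty (fun a _ => PySem.Dict.contains_empty a)
        (by simpa using PySem.List.nodup_pyRange_one 0 (cs.length : Int)),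
      PySem.List.pyRange_zero_nat, List.map_map]
  simp only [show (PySem.Dict.empty : PySem.Dict Int (List Int)).items = [] from rfl,
    List.nil_append]
  apply List.map_congr_left
  intro k hk
  have hk' : k < cs.length := List.mem_range.1 hk
  simp only [Function.comp]
  refine Prod.ext rfl ?_
  show valA Dict cs (k : Int) = _
  have hget : PySem.List.pyGet? cs (k : Int) = some cs[k] := by
    rw [PySem.List.pyGet?_natCast, List.getElem?_eq_getElem hk']
  have hslice : PySem.List.slice cs (some (k : Int)) (some ((k : Int) + 1)) = [cs[k]] := by
    have h1 : ((k : Int) + 1) = ((k + 1 : Nat) : Int) := by push_cast; ring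
    have h2 : k + 1 - k = 1 := by omega
    rw [h1, PySem.List.slice_natCast, h2, List.drop_eq_getElem_cons hk']
    rfl
  have hfuel : (((cs.length : Int)) - (k : Int)).toNat = cs.length - k := by omega
  have hinner := innerA_eq Dict cs (k : Int) (cs.length - k) k [] (by omega) rfl
  rw [hslice] at hinner
  simp only [valA, hget, hfuel, hinner, List.nil_append]

lemma scanB_length (cs : List Char) (w : List Char) (m : Nat) (bs : List (List Int)) :
    (calcScanB cs w m bs).length = bs.length := by
  simp only [calcScanB]
  generalize PySem.List.pyRange 0 ((cs.length : Int) - m + 1) 1 = S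
  induction S generalizing bs with
  | nil => rfl
  | cons s S ih =>
    simp only [List.foldl_cons]
    rw [ih]
    split <;> simp

lemma scanB_aux (cs : List Char) (w : List Char) (m : Nat) :
    ∀ (S : List Int), S.Nodup → (∀ s ∈ S, 0 ≤ s) →
      ∀ (bs : List (List Int)) (i : Nat), i < bs.length →
      (S.foldl (fun bs s =>
          if PySem.List.slice cs (some s) (some (s + m)) == w then
            bs.set s.toNat (bs.getD s.toNat [] ++ [s + (m : Int) - 1])
          else bs) bs).getD i [] =
        bs.getD i [] ++
          (if (i : Int) ∈ S ∧ PySem.List.slice cs (some (i : Int)) (some ((i : Int) + m)) = w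
           then [(i : Int) + m - 1] else []) := by
  intro S
  induction S with
  | nil => intro _ _ bs i hi; simp
  | cons s S ih =>
    intro hnd hpos bs i hi
    simp only [List.foldl_cons]
    have hndS : S.Nodup := (List.nodup_cons.1 hnd).2
    have hposS : ∀ s' ∈ S, 0 ≤ s' := fun s' h => hpos s' (List.mem_cons_of_mem _ h)
    have hs0 : 0 ≤ s := hpos s List.mem_cons_self
    set bs1 := (if PySem.List.slice cs (some s) (some (s + (m : Int))) == w then
        bs.set s.toNat (bs.getD s.toNat [] ++ [s + (m : Int) - 1])
      else bs) with hbs1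
    have hlen1 : bs1.length = bs.length := by rw [hbs1]; split <;> simp
    rw [ih hndS hposS bs1 i (by omega)]
    by_cases heq : (i : Int) = s
    · subst heq
      have hnat : ((i : Nat) : Int).toNat = i := by omega
      have hnotin : ((i : Nat) : Int) ∉ S := (List.nodup_cons.1 hnd).1
      rw [if_neg (fun hc => hnotin hc.1), List.append_nil]
      by_cases hsl : PySem.List.slice cs (some ((i : Nat) : Int)) (some (((i : Nat) : Int) + m)) = w
      · rw [hbs1, if_pos (by simp [hsl]), hnat, List.getD_eq_getElem?_getD,
          List.getElem?_set_self (by omega), Option.getD_some,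
          if_pos ⟨List.mem_cons_self, hsl⟩]
      · rw [hbs1, if_neg (by simp [hsl]), if_neg (fun hc => hsl hc.2)]
        rw [List.append_nil]
    · have hgetD : bs1.getD i [] = bs.getD i [] := by
        rw [hbs1]
        split
        · rw [List.getD_eq_getElem?_getD, List.getElem?_set_ne (by omega),
            ← List.getD_eq_getElem?_getD]
        · rfl
      rw [hgetD]
      have hmem : (((i : Nat) : Int) ∈ s :: S) ↔ (((i : Nat) : Int) ∈ S) := by
        rw [List.mem_cons]
        exact ⟨fun h => h.resolve_left heq, Or.inr⟩
      simp only [hmem]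

lemma scanB_getD (cs : List Char) (w : List Char) (m : Nat) (hm : 1 ≤ m) (hw : w.length = m)
    (bs : List (List Int)) (i : Nat) (hi : i < bs.length) :
    (calcScanB cs w m bs).getD i [] =
      bs.getD i [] ++
        (if PySem.List.slice cs (some (i : Int)) (some ((i : Int) + m)) = w
         then [(i : Int) + m - 1] else []) := by
  simp only [calcScanB]
  rw [scanB_aux cs w m _ (PySem.List.nodup_pyRange_one _ _)
        (fun s hs => (PySem.List.mem_pyRange_one.1 hs).1) bs i hi]
  congr 1
  by_cases hP : PySem.List.slice cs (some (i : Int)) (some ((i : Int) + m)) = w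
  · have hlen : (PySem.List.slice cs (some (i : Int)) (some ((i : Int) + m))).length = m := by
      rw [hP, hw]
    rw [PySem.List.length_slice] at hlen
    have h1 : ((i : Int) + m) = ((i + m : Nat) : Int) := by push_cast; ring
    rw [h1, PySem.List.clampIdx_natCast, PySem.List.clampIdx_natCast] at hlen
    have hmem : (i : Int) ∈ PySem.List.pyRange 0 ((cs.length : Int) - m + 1) 1 := by
      rw [PySem.List.mem_pyRange_one]
      omega
    simp [hmem, hP]
  · simp [hP]

lemma wordsFold_getD (cs : List Char) (ws : List String) (bs : List (List Int)) (i : Nat)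
    (hi : i < bs.length) :
    (ws.foldl (stepB cs) bs).getD i [] =
      bs.getD i [] ++
        (ws.filter (fun w => matchB cs i w.toList)).map
          (fun w => (i : Int) + w.toList.length - 1) := by
  induction ws generalizing bs with
  | nil => simp
  | cons w ws ih =>
    simp only [List.foldl_cons, List.filter_cons]
    by_cases h0 : w.toList = []
    · have hstep : stepB cs bs w = bs := by
        unfold stepB; rw [if_pos (by simp [h0])]
      rw [hstep, h0, matchB_nil]
      simp only [Bool.false_eq_true, if_false]
      exact ih bs hi
    · have h0' : ¬ w.toList.length = 0 := by
        simpa [List.length_eq_zero_iff] using h0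
      have hstep : stepB cs bs w = calcScanB cs w.toList w.toList.length bs := by
        unfold stepB; rw [if_neg h0']
      rw [hstep, ih _ (by rw [scanB_length]; exact hi),
        scanB_getD cs w.toList w.toList.length (by omega) rfl bs i hi,
        matchB_of_ne_nil cs (i : Int) w.toList h0]
      by_cases hsl : PySem.List.slice cs (some (i : Int))
          (some ((i : Int) + w.toList.length)) = w.toList
      · rw [if_pos hsl, if_pos (by simpa only [beq_iff_eq] using hsl)]
        rw [List.map_cons, List.append_assoc, List.singleton_append]
      · rw [if_neg hsl, if_neg (fun hc => hsl (by simpa only [beq_iff_eq] using hc))]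
        rw [List.append_nil]

lemma wordsFold_length (cs : List Char) (ws : List String) (bs : List (List Int)) :
    (ws.foldl (stepB cs) bs).length = bs.length := by
  induction ws generalizing bs with
  | nil => rfl
  | cons w ws ih =>
    simp only [List.foldl_cons]
    rw [ih]
    simp only [stepB]
    split
    · rfl
    · exact scanB_length _ _ _ _

lemma pairFold_eq (cs : List Char) (kvs : List (String × Int)) :
    ∀ (bs : List (List Int)) (seen : PySem.Set String),
      (kvs.foldl
        (fun (st : List (List Int) × PySem.Set String) kv =>
          if PySem.Set.contains st.2 kv.1 then st
          else
            let seen := PySem.Set.add st.2 kv.1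
            let m := kv.1.toList.length
            if m = 0 then (st.1, seen)
            else (calcScanB cs kv.1.toList m st.1, seen)) (bs, seen)).1
      = (freshList (kvs.map (·.1)) seen).foldl (stepB cs) bs := by
  induction kvs with
  | nil => intro bs seen; simp [freshList]
  | cons kv kvs ih =>
    intro bs seen
    simp only [List.foldl_cons, List.map_cons, freshList]
    by_cases hc : PySem.Set.contains seen kv.1
    · simp only [hc, if_true]
      exact ih bs seen
    · simp only [hc, Bool.false_eq_true, if_false]
      by_cases h0 : kv.1.toList.length = 0
      · simp only [h0, if_true, List.foldl_cons]
        rw [ih]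
        congr 1
        unfold stepB
        rw [if_pos h0]
      · simp only [h0, if_false, List.foldl_cons]
        rw [ih]
        congr 1
        unfold stepB
        rw [if_neg h0]

lemma calc_py_alt_eq (sentence : String) (Dict : List (String × Int)) :
    calc_py_alt sentence Dict =
      (List.range sentence.toList.length).map
        (fun (k : Nat) =>
          ((k : Int),
            if ((freshList (Dict.map (·.1)) PySem.Set.empty).filter
                  (fun w => matchB sentence.toList k w.toList)).map
                  (fun w => (k : Int) + w.toList.length - 1) = []
            then [(k : Int)]
            else PySem.List.sorted
              (((freshList (Dict.map (·.1)) PySem.Set.empty).filter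
                  (fun w => matchB sentence.toList k w.toList)).map
                  (fun w => (k : Int) + w.toList.length - 1)) (fun x => x) false)) := by
  set cs := sentence.toList with hcs
  show ((PySem.List.enumerate ((Dict.foldl _ (List.replicate cs.length [], PySem.Set.empty)).1) 0).map _) = _
  rw [pairFold_eq cs Dict (List.replicate cs.length []) PySem.Set.empty]
  have hblen : ((freshList (Dict.map (·.1)) PySem.Set.empty).foldl (stepB cs)
      (List.replicate cs.length [])).length = cs.length := by
    rw [wordsFold_length, List.length_replicate]
  apply List.ext_getElem
  · simp only [List.length_map, PySem.List.length_enumerate, List.length_range, hblen]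
  · intro k h1 h2
    have hk : k < cs.length := by simpa using h2
    simp only [List.getElem_map, List.getElem_range]
    rw [PySem.List.getElem_enumerate _ _ _ (by rw [PySem.List.length_enumerate, hblen]; exact hk)]
    have hrepl : (List.replicate cs.length ([] : List Int)).getD k [] = [] := by
      rw [List.getD_eq_getElem?_getD, List.getElem?_eq_getElem (by simpa using hk)]
      simp
    have hfold := wordsFold_getD cs (freshList (Dict.map (·.1)) PySem.Set.empty)
      (List.replicate cs.length []) k (by simpa using hk)
    rw [hrepl, List.nil_append] at hfold
    have hbk : ((freshList (Dict.map (·.1)) PySem.Set.empty).foldl (stepB cs)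
        (List.replicate cs.length []))[k] =
        ((freshList (Dict.map (·.1)) PySem.Set.empty).foldl (stepB cs)
        (List.replicate cs.length [])).getD k [] := by
      rw [List.getD_eq_getElem?_getD, List.getElem?_eq_getElem (by omega), Option.getD_some]
    rw [hbk, hfold, zero_add]

lemma bucket_perm_ends (Dict : List (String × Int)) (cs : List Char) (k : Nat) (hk : k < cs.length) :
    (endsA Dict cs k k).Perm
      (((freshList (Dict.map (·.1)) PySem.Set.empty).filter
          (fun w => matchB cs k w.toList)).map
         (fun w => (k : Int) + w.toList.length - 1)) := by
  have hfresh : ∀ x, x ∈ freshList (Dict.map (·.1)) PySem.Set.empty ↔ x ∈ Dict.map (·.1) := by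
    intro x
    rw [freshList_mem]
    exact ⟨fun h => h.1, fun h => ⟨h, by simp [PySem.Set.empty]⟩⟩
  have hmatch_len : ∀ w : String, matchB cs (k : Int) w.toList = true →
      1 ≤ w.toList.length ∧ k + w.toList.length ≤ cs.length ∧
      PySem.List.slice cs (some (k : Int)) (some ((k : Int) + w.toList.length)) = w.toList := by
    intro w hm
    obtain ⟨hne, hsl⟩ := (matchB_iff cs (k : Int) w.toList).1 hm
    have h1 : 1 ≤ w.toList.length := by
      have := List.length_pos_of_ne_nil hne
      omega
    refine ⟨h1, ?_, hsl⟩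
    have hlen : (PySem.List.slice cs (some (k : Int)) (some ((k : Int) + w.toList.length))).length
        = w.toList.length := by rw [hsl]
    rw [PySem.List.length_slice] at hlen
    have hc : ((k : Int) + w.toList.length) = ((k + w.toList.length : Nat) : Int) := by
      push_cast; ring
    rw [hc, PySem.List.clampIdx_natCast, PySem.List.clampIdx_natCast] at hlen
    omega
  have h2 : (((freshList (Dict.map (·.1)) PySem.Set.empty).filter
      (fun w => matchB cs k w.toList)).map
      (fun w => (k : Int) + w.toList.length - 1)).Nodup := by
    apply List.Nodup.map_on
    · intro w hw w' hw' heq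
      have hmw := (List.mem_filter.1 hw).2
      have hmw' := (List.mem_filter.1 hw').2
      obtain ⟨_, _, hslw⟩ := hmatch_len w hmw
      obtain ⟨_, _, hslw'⟩ := hmatch_len w' hmw'
      have hlen : w.toList.length = w'.toList.length := by omega
      have : w.toList = w'.toList := by
        rw [← hslw, ← hslw', hlen]
      exact String.toList_inj.1 this
    · exact (freshList_nodup _ _).filter _
  have h1 : (endsA Dict cs k k).Nodup :=
    (PySem.List.nodup_pyRange_one _ _).filter _
  rw [List.perm_ext_iff_of_nodup h1 h2]
  intro a
  constructor
  · intro ha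
    obtain ⟨hr, hP⟩ := List.mem_filter.1 ha
    rw [PySem.List.mem_pyRange_one] at hr
    obtain ⟨hka, han⟩ := hr
    obtain ⟨kv, hkv, hq⟩ := List.any_eq_true.1 hP
    have hsl : kv.1.toList = PySem.List.slice cs (some (k : Int)) (some (a + 1)) := by
      simpa only [beq_iff_eq] using hq
    have ha0 : 0 ≤ a := le_trans (by omega) hka
    have hlen : kv.1.toList.length = a.toNat + 1 - k := by
      have hh : (PySem.List.slice cs (some (k : Int)) (some (a + 1))).length
          = kv.1.toList.length := by rw [← hsl]
      rw [PySem.List.length_slice] at hh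
      have hc : (a + 1) = ((a.toNat + 1 : Nat) : Int) := by omega
      rw [hc, PySem.List.clampIdx_natCast, PySem.List.clampIdx_natCast] at hh
      omega
    have hmB : matchB cs (k : Int) kv.1.toList = true := by
      rw [matchB_iff]
      constructor
      · intro hnil
        rw [hnil] at hlen
        simp only [List.length_nil] at hlen
        omega
      · have hc : (k : Int) + kv.1.toList.length = a + 1 := by
          rw [hlen]; omega
        rw [hc, ← hsl]
    refine List.mem_map.2 ⟨kv.1,
      List.mem_filter.2 ⟨(hfresh kv.1).2 (List.mem_map.2 ⟨kv, hkv, rfl⟩), hmB⟩, ?_⟩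
    rw [hlen]; omega
  · intro ha
    obtain ⟨w, hwmem, hval⟩ := List.mem_map.1 ha
    obtain ⟨hf, hmB⟩ := List.mem_filter.1 hwmem
    obtain ⟨hm1, hm2, hsl⟩ := hmatch_len w hmB
    obtain ⟨kv, hkv, hkveq⟩ := List.mem_map.1 ((hfresh w).1 hf)
    apply List.mem_filter.2
    subst hval
    refine ⟨?_, ?_⟩
    · rw [PySem.List.mem_pyRange_one]
      omega
    · apply List.any_eq_true.2
      refine ⟨kv, hkv, ?_⟩
      have harith : ((k : Int) + w.toList.length - 1) + 1 = (k : Int) + w.toList.length := by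
        ring
      rw [harith, hsl, hkveq]
      simp

-- ===== VERDICT (by name: the statement is the Claim_ definition above) =====
theorem calc_py_spec : Claim_equal_calc_py := by
  intro sentence Dict _hd
  show calc_py sentence Dict = calc_py_alt sentence Dict
  rw [calc_py_eq, calc_py_alt_eq]
  apply List.map_congr_left
  intro k hk
  have hk' : k < sentence.toList.length := List.mem_range.1 hk
  set cs := sentence.toList with hcs
  have hperm := bucket_perm_ends Dict cs k hk'
  have hsorted : PySem.List.sorted
      (((freshList (Dict.map (·.1)) PySem.Set.empty).filter
          (fun w => matchB cs k w.toList)).map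
         (fun w => (k : Int) + w.toList.length - 1)) (fun x => x) false
      = endsA Dict cs k k := by
    apply PySem.List.sorted_eq_of_perm_of_pairwise_lt _ _ _ hperm
    exact (PySem.List.pairwise_lt_pyRange_one _ _).filter _
  refine Prod.ext rfl ?_
  by_cases hnil : endsA Dict cs k k = []
  · have hbnil : ((freshList (Dict.map (·.1)) PySem.Set.empty).filter
        (fun w => matchB cs k w.toList)).map
        (fun w => (k : Int) + w.toList.length - 1) = [] := by
      have h' := hperm
      rw [hnil] at h'
      exact h'.symm.eq_nil
    rw [hnil, hbnil]
    simp
  · have hbnil : ((freshList (Dict.map (·.1)) PySem.Set.empty).filter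
        (fun w => matchB cs k w.toList)).map
        (fun w => (k : Int) + w.toList.length - 1) ≠ [] := by
      intro h
      have h' := hperm
      rw [h] at h'
      exact hnil h'.eq_nil
    rw [if_neg hnil, if_neg hbnil, hsorted]
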